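-- pv_equiv track=rewrite | github.com/EngSeif/DEPI-AMIT | Assignmnet - Python Basics/Q3/funcs.py | count_no_case_sensitive
-- ===== SOURCE A (Python) =====
-- def count_no_case_sensitive(sentence):
--     """
--          count_no_case_sensitive - count number of occurance of each word in
--                                 a sentence with no mantaining for case sensitivity
--
--         parameters :
--             - sentence : string input
--             - word_list : sentence split into list
--
--         return :
--             a dictionary where keys are the words in the
--             sentence and values are the counts of how
--             many times each word appears
--     """
--
--     # make a unique list of words
--     word_list = list(set(sentence.lower().split()))
--
--     word_dict = dict()
--     for word in word_list:
--         if word_dict.get(word.lower(), None) == None: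
--             word_dict[word.lower()] = 0
--         for i in range(len(sentence)):
--             # Using lower() Method to ignore case sensitivity
--             if sentence[i: i + len(word)].lower() == word.lower():
--                 word_dict[word.lower()] += 1
--     return word_dict
-- ===== SOURCE B (Python) =====
-- def count_no_case_sensitive(sentence):
--     """Single sweep over the text: bucket the distinct words by length in a hash
--     map, then for each text position probe the map once per distinct word length,
--     instead of re-scanning the whole text once per word."""
--     low = sentence.lower()
--     words = list(dict.fromkeys(low.split()))
--     counts = {w: 0 for w in words}
--     lengths = list(dict.fromkeys(map(len, words)))
--     n = len(low)
--     for i in range(n):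
--         for L in lengths:
--             if i + L <= n:
--                 s = low[i:i + L]
--                 if s in counts:
--                     counts[s] += 1
--     return counts
-- ===== Notes on version B (the rewrite author's own statement) =====
-- stated objective: faster
-- what changed: B inverts the loop structure: instead of A's one full scan of the text per distinct word, B buckets the distinct words in a hash map, collects the distinct word lengths, and makes a SINGLE left-to-right sweep of the lowered text, probing the map once per (position, distinct length); per-position work drops from #distinct-words slice comparisons to #distinct-lengths hash lookups.
import Mathlib
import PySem

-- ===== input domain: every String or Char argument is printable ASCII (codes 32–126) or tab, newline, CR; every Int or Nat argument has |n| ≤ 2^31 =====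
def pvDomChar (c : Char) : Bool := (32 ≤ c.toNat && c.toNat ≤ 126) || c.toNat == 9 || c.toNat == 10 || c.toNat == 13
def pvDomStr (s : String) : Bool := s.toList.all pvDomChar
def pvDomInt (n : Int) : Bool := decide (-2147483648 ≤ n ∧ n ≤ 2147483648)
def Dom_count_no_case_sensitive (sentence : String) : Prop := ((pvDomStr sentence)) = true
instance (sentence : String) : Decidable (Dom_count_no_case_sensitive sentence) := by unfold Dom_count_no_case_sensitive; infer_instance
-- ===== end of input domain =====

-- B inverts A's loop structure: a hash map of the distinct words plus the list of distinct word
-- lengths, then ONE sweep over the lowered text probing the map once per (position, length),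
-- instead of A's full text scan per distinct word (objective: faster; Python's dict output is
-- compared ignoring key order, since A's key order comes from set iteration).

-- ===== PORT A =====
def count_no_case_sensitive (sentence : String) : List (String × Int) :=
  let word_list : List String :=
    PySem.Set.ofList (PySem.Str.split₀ (PySem.Str.lower sentence))
  let word_dict : PySem.Dict String Int :=
    word_list.foldl (fun d word =>
      let d' := if (d.get? (PySem.Str.lower word)).isNone
                then d.insert (PySem.Str.lower word) 0 else d
      (PySem.List.pyRange 0 (PySem.Str.len sentence)).foldl (fun d i =>
        if PySem.Str.lower (PySem.Str.slice sentence (some i) (some (i + PySem.Str.len word)))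
             == PySem.Str.lower word
        then d.insert (PySem.Str.lower word) (d.getD (PySem.Str.lower word) 0 + 1)
        else d) d') PySem.Dict.empty
  word_dict.items

-- ===== PORT B =====
def count_no_case_sensitive_alt (sentence : String) : List (String × Int) :=
  let low := PySem.Str.lower sentence
  let words := PySem.List.dedup (PySem.Str.split₀ low)
  let counts0 : PySem.Dict String Int :=
    words.foldl (fun d w => d.insert w 0) PySem.Dict.empty
  let lengths : List Int := PySem.List.dedup (words.map (fun w => PySem.Str.len w))
  let n := PySem.Str.len low
  let counts :=
    (PySem.List.pyRange 0 n).foldl (fun d i =>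
      lengths.foldl (fun d L =>
        if i + L ≤ n then
          let s := PySem.Str.slice low (some i) (some (i + L))
          if d.contains s then d.insert s (d.getD s 0 + 1) else d
        else d) d) counts0
  counts.items

-- ===== PRECONDITION & SPEC =====
def Spec_count_no_case_sensitive (sentence : String) (out : List (String × Int)) : Prop := out = count_no_case_sensitive_alt sentence
instance (sentence : String) (out : List (String × Int)) : Decidable (Spec_count_no_case_sensitive sentence out) := by unfold Spec_count_no_case_sensitive; infer_instance

-- ===== CLAIM (what is proved, stated in full; the proofs are below) =====
def Claim_equal_count_no_case_sensitive : Prop := ∀ (sentence : String), Dom_count_no_case_sensitive sentence → Spec_count_no_case_sensitive sentence (count_no_case_sensitive sentence)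

-- ===== LEMMAS AND PROOFS =====

-- characters of an uppercase letter
theorem pv_isupper_bounds (d : Char) (hd : PySem.Chars.isupper d = true) :
    65 ≤ d.toNat ∧ d.toNat ≤ 90 := by
  simp only [PySem.Chars.isupper, Bool.and_eq_true, decide_eq_true_eq, Char.le_def,
    UInt32.le_iff_toNat_le] at hd
  exact hd

theorem pv_lowerChar_idem (c : Char) :
    PySem.Chars.lowerChar (PySem.Chars.lowerChar c) = PySem.Chars.lowerChar c := by
  unfold PySem.Chars.lowerChar
  cases hu : PySem.Chars.isupper c
  · simp [hu]
  · simp only [if_true]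
    obtain ⟨h1, h2⟩ := pv_isupper_bounds c hu
    have hv : (c.toNat + 32).isValidChar := Or.inl (by omega)
    have ht : (Char.ofNat (c.toNat + 32)).toNat = c.toNat + 32 := by
      rw [Char.toNat_ofNat, if_pos hv]
    rw [if_neg]
    intro hcon
    have := (pv_isupper_bounds _ hcon).2
    omega

-- every piece of split() is nonempty and made of characters of the source (plus the carry)
theorem pv_split0_go_facts (Q : Char → Prop) :
    ∀ (s cur : List Char) (acc : List (List Char)),
      (∀ x ∈ acc, x ≠ [] ∧ ∀ c ∈ x, Q c) → (∀ c ∈ cur, Q c) → (∀ c ∈ s, Q c) →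
      ∀ x ∈ PySem.Chars.split₀.go s cur acc, x ≠ [] ∧ ∀ c ∈ x, Q c := by
  intro s
  induction s with
  | nil =>
    intro cur acc hacc hcur _ x hx
    rw [PySem.Chars.split₀.go.eq_def] at hx
    dsimp only at hx
    by_cases hc : cur.isEmpty
    · simp only [hc, if_true, List.mem_reverse] at hx
      exact hacc x hx
    · rw [if_neg hc, List.reverse_cons, List.mem_append] at hx
      rcases hx with h | h
      · exact hacc x (List.mem_reverse.mp h)
      · rw [List.mem_singleton] at h
        subst h
        refine ⟨by simpa [List.isEmpty_iff] using hc, ?_⟩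
        intro c hcmem
        exact hcur c (List.mem_reverse.mp hcmem)
  | cons a s ih =>
    intro cur acc hacc hcur hs x hx
    rw [PySem.Chars.split₀.go.eq_def] at hx
    dsimp only at hx
    by_cases ha : PySem.Chars.isspace a
    · by_cases hc : cur.isEmpty
      · simp only [ha, hc, if_true] at hx
        exact ih [] acc hacc (by simp) (fun c hc' => hs c (List.mem_cons_of_mem _ hc')) x hx
      · simp only [ha, hc, if_true] at hx
        refine ih [] _ ?_ (by simp) (fun c hc' => hs c (List.mem_cons_of_mem _ hc')) x hx
        intro y hy
        rcases List.mem_cons.mp hy with h | h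
        · subst h
          exact ⟨by simpa [List.isEmpty_iff] using hc,
                 fun c hcmem => hcur c (List.mem_reverse.mp hcmem)⟩
        · exact hacc y h
    · simp only [ha] at hx
      refine ih (a :: cur) acc hacc ?_ (fun c hc' => hs c (List.mem_cons_of_mem _ hc')) x hx
      intro c hc'
      rcases List.mem_cons.mp hc' with h | h
      · exact h ▸ hs a List.mem_cons_self
      · exact hcur c h

-- a word of (lower sentence).split() is nonempty and already lowercase
theorem pv_word_facts (u : List Char) (w : List Char)
    (hw : w ∈ PySem.Chars.split₀ (PySem.Chars.lower u)) :
    w ≠ [] ∧ PySem.Chars.lower w = w := by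
  have h := pv_split0_go_facts (fun c => PySem.Chars.lowerChar c = c)
    (PySem.Chars.lower u) [] [] (by simp) (by simp)
    (by
      intro c hc
      simp only [PySem.Chars.lower, List.mem_map] at hc
      obtain ⟨c', _, rfl⟩ := hc
      exact pv_lowerChar_idem c')
    w hw
  refine ⟨h.1, ?_⟩
  unfold PySem.Chars.lower
  calc List.map PySem.Chars.lowerChar w = List.map id w := List.map_congr_left h.2
    _ = w := List.map_id w

-- counting loop over an arbitrary index list: repeated `d[k] += 1` at one key
theorem pv_foldl_insert_count (k : String) (p : Int → Bool) (l : List Int)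
    (d : PySem.Dict String Int) (c : Int) :
    l.foldl (fun d i => if p i then d.insert k (d.getD k 0 + 1) else d) (d.insert k c)
      = d.insert k (c + (l.countP p : Int)) := by
  induction l generalizing c with
  | nil => simp
  | cons a l ih =>
    simp only [List.foldl_cons]
    by_cases h : p a
    · rw [if_pos h, PySem.Dict.getD_insert_self, PySem.Dict.insert_insert_self, ih,
        List.countP_cons, if_pos h]
      congr 1
      push_cast
      ring
    · rw [if_neg h, ih, List.countP_cons, if_neg h, Nat.add_zero]

-- the outer loop of A over fresh lowercase words appends (w, count) pairs
theorem pv_outerA (sentence : String) :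
    ∀ (ws : List String) (d : PySem.Dict String Int),
      (∀ w ∈ ws, PySem.Str.lower w = w) → ws.Nodup → (∀ w ∈ ws, d.contains w = false) →
      (ws.foldl (fun d word =>
        let d' := if (d.get? (PySem.Str.lower word)).isNone
                  then d.insert (PySem.Str.lower word) 0 else d
        (PySem.List.pyRange 0 (PySem.Str.len sentence)).foldl (fun d i =>
          if PySem.Str.lower (PySem.Str.slice sentence (some i) (some (i + PySem.Str.len word)))
               == PySem.Str.lower word
          then d.insert (PySem.Str.lower word) (d.getD (PySem.Str.lower word) 0 + 1)
          else d) d') d).items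
      = d.items ++ ws.map (fun w => (w, (0 : Int) +
          ((PySem.List.pyRange 0 (PySem.Str.len sentence)).countP
            (fun i => PySem.Str.lower (PySem.Str.slice sentence (some i) (some (i + PySem.Str.len w)))
               == PySem.Str.lower w) : Int))) := by
  intro ws
  induction ws with
  | nil => intro d _ _ _; simp
  | cons w ws ih =>
    intro d hlow hnd hfresh
    have hl : PySem.Str.lower w = w := hlow w List.mem_cons_self
    have hfw : d.contains w = false := hfresh w List.mem_cons_self
    simp only [List.foldl_cons, List.map_cons]
    rw [hl]
    have hget : d.get? w = none := (PySem.Dict.get?_eq_none_iff_contains d w).mpr hfw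
    simp only [hget, Option.isNone_none, if_true]
    rw [pv_foldl_insert_count w _ _ d 0]
    rw [ih (d.insert w _) (fun w' h => hlow w' (List.mem_cons_of_mem _ h)) hnd.of_cons
      (by
        intro w' hw'
        rw [PySem.Dict.contains_insert]
        have hne : w' ≠ w := by
          intro hcon
          exact (List.nodup_cons.mp hnd).1 (hcon ▸ hw')
        simp [hne, hfresh w' (List.mem_cons_of_mem _ hw')])]
    rw [PySem.Dict.items_insert_of_not_contains d _ hfw]
    simp

-- the per-position condition of A, at position k, is "w starts at k in the lowered text"
theorem pv_condA_eq (sentence : String) (w : String) (hl : PySem.Str.lower w = w)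
    (k : Nat) :
    (PySem.Str.lower (PySem.Str.slice sentence (some (k : Int))
        (some ((k : Int) + PySem.Str.len w))) == PySem.Str.lower w)
      = decide (w.toList <+: (PySem.Chars.lower sentence.toList).drop k) := by
  have hlen : PySem.Str.len w = (w.toList.length : Int) := rfl
  have hcast : (k : Int) + (w.toList.length : Int) = ((k + w.toList.length : Nat) : Int) := by
    push_cast; ring
  rw [hlen, hcast]
  have hslice : (PySem.Str.lower (PySem.Str.slice sentence (some (k : Int))
      (some ((k + w.toList.length : Nat) : Int)))).toList
      = ((PySem.Chars.lower sentence.toList).drop k).take w.toList.length := by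
    rw [PySem.Str.toList_lower, PySem.Str.toList_slice, PySem.Chars.slice_eq_listSlice,
      PySem.List.slice_natCast]
    unfold PySem.Chars.lower
    rw [List.map_take, List.map_drop]
    congr 1
    omega
  by_cases h : w.toList <+: (PySem.Chars.lower sentence.toList).drop k
  · rw [decide_eq_true h]
    rw [beq_iff_eq]
    apply String.ext
    rw [hslice, hl]
    exact (List.prefix_iff_eq_take.mp h).symm
  · rw [decide_eq_false h]
    rw [beq_eq_false_iff_ne]
    intro hcon
    apply h
    rw [List.prefix_iff_eq_take]
    have := congrArg String.toList hcon
    rw [hslice, hl] at this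
    exact this.symm

-- B's guarded inner loop over the length list is the bump-loop over the candidate slices
theorem pv_guard_fold (low : String) (n i : Int) (l : List Int) (d : PySem.Dict String Int) :
    l.foldl (fun d L =>
        if i + L ≤ n then
          let s := PySem.Str.slice low (some i) (some (i + L))
          if d.contains s then d.insert s (d.getD s 0 + 1) else d
        else d) d
      = ((l.filter (fun L => decide (i + L ≤ n))).map
          (fun L => PySem.Str.slice low (some i) (some (i + L)))).foldl
          (fun d s => if d.contains s then d.insert s (d.getD s 0 + 1) else d) d := by
  induction l generalizing d with
  | nil => rfl
  | cons a l ih =>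
    by_cases h : i + a ≤ n
    · simp only [List.foldl_cons, if_pos h, List.filter_cons, decide_eq_true h]
      exact ih _
    · simp only [List.foldl_cons, if_neg h, List.filter_cons, decide_eq_false h]
      exact ih _

-- B's double loop is the bump-loop over the flattened list of candidate slices
theorem pv_outer_flat (low : String) (n : Int) (lengths : List Int) (xs : List Int)
    (d : PySem.Dict String Int) :
    xs.foldl (fun d i =>
        lengths.foldl (fun d L =>
          if i + L ≤ n then
            let s := PySem.Str.slice low (some i) (some (i + L))
            if d.contains s then d.insert s (d.getD s 0 + 1) else d
          else d) d) d
      = (xs.flatMap (fun i =>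
          (lengths.filter (fun L => decide (i + L ≤ n))).map
            (fun L => PySem.Str.slice low (some i) (some (i + L))))).foldl
          (fun d s => if d.contains s then d.insert s (d.getD s 0 + 1) else d) d := by
  induction xs generalizing d with
  | nil => rfl
  | cons a xs ih =>
    simp only [List.foldl_cons, List.flatMap_cons, List.foldl_append]
    rw [pv_guard_fold, ih]

-- the bump loop never changes the key list
theorem pv_bump_keys (es : List String) (d : PySem.Dict String Int) :
    (es.foldl (fun d s => if d.contains s then d.insert s (d.getD s 0 + 1) else d) d).keys
      = d.keys := by
  induction es generalizing d with
  | nil => rfl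
  | cons s es ih =>
    simp only [List.foldl_cons]
    by_cases hc : d.contains s
    · rw [if_pos hc, ih, PySem.Dict.keys_insert_of_contains d _ hc]
    · rw [if_neg hc, ih]

-- the bump loop adds, at a present key, the number of occurrences of that key
theorem pv_bump_getD (es : List String) (d : PySem.Dict String Int) (w : String)
    (hw : d.contains w = true) :
    (es.foldl (fun d s => if d.contains s then d.insert s (d.getD s 0 + 1) else d) d).getD w 0
      = d.getD w 0 + (es.count w : Int) := by
  induction es generalizing d with
  | nil => simp
  | cons s es ih =>
    simp only [List.foldl_cons, List.count_cons]
    by_cases hc : d.contains s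
    · rw [if_pos hc]
      have hw' : (d.insert s (d.getD s 0 + 1)).contains w = true := by
        rw [PySem.Dict.contains_insert]
        simp [hw]
      rw [ih _ hw', PySem.Dict.getD_insert]
      by_cases hws : w = s
      · subst hws
        simp only [beq_self_eq_true, if_true]
        push_cast
        ring
      · rw [if_neg hws, if_neg (by simpa [beq_iff_eq] using Ne.symm hws)]
        push_cast
        ring
    · rw [if_neg hc]
      have hws : ¬ (s == w) = true := by
        intro hcon
        rw [beq_iff_eq] at hcon
        exact absurd (hcon ▸ hw) (by simp [hc])
      rw [ih _ hw, if_neg hws]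
      push_cast
      ring

-- evaluation of B's sweep: each distinct word is paired with its occurrence count
-- among the candidate slices
theorem pv_B_eval (low : String) (n : Int) (ws : List String) (lengths : List Int)
    (hndws : ws.Nodup) :
    ((PySem.List.pyRange 0 n).foldl (fun d i =>
        lengths.foldl (fun d L =>
          if i + L ≤ n then
            let s := PySem.Str.slice low (some i) (some (i + L))
            if d.contains s then d.insert s (d.getD s 0 + 1) else d
          else d) d)
      (ws.foldl (fun d w => d.insert w 0) (PySem.Dict.empty : PySem.Dict String Int))).items
    = ws.map (fun w => (w,
        ((((PySem.List.pyRange 0 n).flatMap (fun i =>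
          (lengths.filter (fun L => decide (i + L ≤ n))).map
            (fun L => PySem.Str.slice low (some i) (some (i + L))))).count w : Nat) : Int))) := by
  have hc0 : (ws.foldl (fun d w => d.insert w 0)
      (PySem.Dict.empty : PySem.Dict String Int)).items
      = ws.map (fun w => (w, (0 : Int))) := by
    rw [PySem.Dict.items_foldl_insert_fresh ws (fun w => w) (fun _ => (0 : Int))
      PySem.Dict.empty (fun a _ => PySem.Dict.contains_empty a)
      (by rw [List.map_id']; exact hndws)]
    rfl
  have hkeys0 : (ws.foldl (fun d w => d.insert w 0)
      (PySem.Dict.empty : PySem.Dict String Int)).keys = ws := by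
    unfold PySem.Dict.keys
    rw [hc0]
    simp [Function.comp_def]
  rw [pv_outer_flat]
  rw [PySem.Dict.items_eq_map_keys _ (by rw [pv_bump_keys, hkeys0]; exact hndws) 0,
    pv_bump_keys, hkeys0]
  apply List.map_congr_left
  intro w hw
  have hcont0 : (ws.foldl (fun d w => d.insert w 0)
      (PySem.Dict.empty : PySem.Dict String Int)).contains w = true := by
    rw [PySem.Dict.contains_eq_decide_mem_keys, hkeys0]
    simpa using hw
  have hget0 : (ws.foldl (fun d w => d.insert w 0)
      (PySem.Dict.empty : PySem.Dict String Int)).getD w 0 = 0 :=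
    PySem.Dict.getD_of_mem_items _
      (by rw [hc0]; exact List.mem_map.mpr ⟨w, hw, rfl⟩)
      (by rw [hkeys0]; exact hndws) 0
  rw [pv_bump_getD _ _ w hcont0, hget0, zero_add]

-- on a Nodup list where the predicate can only hold at `a`, countP is the indicator at `a`
theorem pv_countP_nodup (l : List Int) (p : Int → Bool) (a : Int)
    (hnd : l.Nodup) (ha : a ∈ l) (hu : ∀ x ∈ l, p x = true → x = a) :
    l.countP p = if p a then 1 else 0 := by
  induction l with
  | nil => cases ha
  | cons b l ih =>
    rw [List.countP_cons]
    rcases List.mem_cons.mp ha with rfl | hal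
    · have hz : l.countP p = 0 := by
        rw [List.countP_eq_zero]
        intro x hx hpx
        have := hu x (List.mem_cons_of_mem _ hx) hpx
        exact absurd (this ▸ hx) (List.nodup_cons.mp hnd).1
      rw [hz]
      by_cases hp : p a
      · simp [hp]
      · simp [hp]
    · have hpb : p b = false := by
        by_contra hcon
        rw [Bool.not_eq_false] at hcon
        have := hu b List.mem_cons_self hcon
        exact absurd (this ▸ hal) (List.nodup_cons.mp hnd).1
      rw [hpb, if_neg (by simp), Nat.add_zero]
      exact ih (List.nodup_cons.mp hnd).2 hal
        (fun x hx hpx => hu x (List.mem_cons_of_mem _ hx) hpx)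

-- the candidate slices at one position contain w exactly when w starts there in the text
theorem pv_pos_count (low : String) (lengths : List Int) (w : String)
    (hne : w.toList ≠ [])
    (hlen : ∀ L ∈ lengths, ∃ m : Nat, L = (m : Int))
    (hnd : lengths.Nodup)
    (hmem : ((w.toList.length : Nat) : Int) ∈ lengths)
    (k : Nat) :
    ((lengths.filter (fun L => decide ((k : Int) + L ≤ PySem.Str.len low))).map
        (fun L => PySem.Str.slice low (some (k : Int)) (some ((k : Int) + L)))).count w
      = if w.toList <+: low.toList.drop k then 1 else 0 := by
  have hN : PySem.Str.len low = (low.toList.length : Int) := rfl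
  have hslice : ∀ m : Nat,
      (PySem.Str.slice low (some (k : Int)) (some ((k : Int) + (m : Int)))).toList
        = (low.toList.drop k).take m := by
    intro m
    rw [PySem.Str.toList_slice, PySem.Chars.slice_eq_listSlice, PySem.List.slice_natCast_add]
  rw [List.count_eq_countP, List.countP_map, List.countP_filter]
  simp only [Function.comp_def]
  set p : Int → Bool := fun L =>
    (PySem.Str.slice low (some (k : Int)) (some ((k : Int) + L)) == w)
      && decide ((k : Int) + L ≤ PySem.Str.len low) with hp
  have hu : ∀ L ∈ lengths, p L = true → L = ((w.toList.length : Nat) : Int) := by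
    intro L hL hpL
    obtain ⟨m, rfl⟩ := hlen L hL
    rw [hp] at hpL
    simp only [Bool.and_eq_true, beq_iff_eq, decide_eq_true_eq, hN] at hpL
    obtain ⟨heq, hle⟩ := hpL
    have hlen' := congrArg (fun s => s.toList.length) heq
    simp only [hslice m, List.length_take, List.length_drop] at hlen'
    have hkm : k + m ≤ low.toList.length := by exact_mod_cast hle
    have : m = w.toList.length := by omega
    exact_mod_cast this
  rw [pv_countP_nodup _ p _ hnd hmem hu]
  by_cases hpref : w.toList <+: low.toList.drop k
  · rw [if_pos hpref]
    have hwk : w.toList.length ≤ low.toList.length - k := by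
      have := hpref.length_le
      simpa using this
    have hkN : k ≤ low.toList.length := by
      by_contra hcon
      rw [List.drop_eq_nil_of_le (by omega)] at hpref
      exact hne (List.prefix_nil.mp hpref)
    have hpa : p ((w.toList.length : Nat) : Int) = true := by
      rw [hp]
      simp only [Bool.and_eq_true, beq_iff_eq, decide_eq_true_eq, hN]
      constructor
      · apply String.ext
        rw [hslice w.toList.length]
        exact (List.prefix_iff_eq_take.mp hpref).symm
      · omega
    rw [if_pos hpa]
  · rw [if_neg hpref]
    rw [if_neg]
    intro hpa
    rw [hp] at hpa
    simp only [Bool.and_eq_true, beq_iff_eq, decide_eq_true_eq, hN] at hpa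
    apply hpref
    rw [List.prefix_iff_eq_take]
    have := congrArg String.toList hpa.1
    rw [hslice w.toList.length] at this
    exact this.symm

-- a map whose entries are 0/1 indicators sums to the countP
theorem pv_sum_indicator {α : Type} (l : List α) (f : α → Nat) (q : α → Bool)
    (h : ∀ x ∈ l, f x = if q x then 1 else 0) :
    (l.map f).sum = l.countP q := by
  induction l with
  | nil => rfl
  | cons a l ih =>
    rw [List.map_cons, List.sum_cons, List.countP_cons,
      ih (fun x hx => h x (List.mem_cons_of_mem _ hx)), h a List.mem_cons_self]
    by_cases hq : q a
    · simp [hq, Nat.add_comm]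
    · simp [hq]

set_option maxHeartbeats 1000000 in
-- per distinct word: B's occurrence count among the candidate slices is A's per-word count
theorem pv_word_count (sentence : String) (lengths : List Int) (w : String)
    (hne : w.toList ≠ []) (hl : PySem.Str.lower w = w)
    (hlenfact : ∀ L ∈ lengths, ∃ m : Nat, L = (m : Int))
    (hndlens : lengths.Nodup)
    (hmemlen : ((w.toList.length : Nat) : Int) ∈ lengths) :
    (((PySem.List.pyRange 0 (PySem.Str.len (PySem.Str.lower sentence))).flatMap (fun i =>
        (lengths.filter (fun L => decide (i + L ≤ PySem.Str.len (PySem.Str.lower sentence)))).map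
          (fun L => PySem.Str.slice (PySem.Str.lower sentence) (some i) (some (i + L))))).count w : Nat)
    = (PySem.List.pyRange 0 (PySem.Str.len sentence)).countP
        (fun i => PySem.Str.lower (PySem.Str.slice sentence (some i) (some (i + PySem.Str.len w)))
           == PySem.Str.lower w) := by
  have hNn : PySem.Str.len (PySem.Str.lower sentence) = ((sentence.toList.length : Nat) : Int) := by
    show ((PySem.Str.lower sentence).toList.length : Int) = _
    rw [PySem.Str.toList_lower]
    unfold PySem.Chars.lower
    simp
  have hNs : PySem.Str.len sentence = ((sentence.toList.length : Nat) : Int) := rfl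
  rw [hNs, PySem.List.pyRange_zero_natCast, List.countP_map]
  conv_lhs => rw [hNn, PySem.List.pyRange_zero_natCast]
  rw [List.flatMap_map, List.count_eq_countP, List.countP_flatMap]
  apply pv_sum_indicator
  intro k _
  simp only [Function.comp_def]
  rw [← List.count_eq_countP]
  have hply : ((sentence.toList.length : Nat) : Int) = PySem.Str.len (PySem.Str.lower sentence) := hNn.symm
  simp only [hply]
  rw [pv_pos_count (PySem.Str.lower sentence) lengths w hne hlenfact
    hndlens hmemlen k]
  have hcond := pv_condA_eq sentence w hl k
  rw [PySem.Str.toList_lower]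
  simp only [hcond]
  by_cases hpref : w.toList <+: (PySem.Chars.lower sentence.toList).drop k
  · simp [hpref]
  · simp [hpref]

-- B's port, with its let-bindings expanded (definitional)
theorem pv_alt_unfold (sentence : String) :
    count_no_case_sensitive_alt sentence =
      ((PySem.List.pyRange 0 (PySem.Str.len (PySem.Str.lower sentence))).foldl
        (fun d i =>
          (PySem.List.dedup ((PySem.List.dedup (PySem.Str.split₀ (PySem.Str.lower sentence))).map
              (fun w => PySem.Str.len w))).foldl
            (fun d L =>
              if i + L ≤ PySem.Str.len (PySem.Str.lower sentence) then
                let s := PySem.Str.slice (PySem.Str.lower sentence) (some i) (some (i + L))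
                if d.contains s then d.insert s (d.getD s 0 + 1) else d
              else d) d)
        ((PySem.List.dedup (PySem.Str.split₀ (PySem.Str.lower sentence))).foldl
          (fun d w => d.insert w 0) PySem.Dict.empty)).items := rfl

-- ===== VERDICT (by name: the statement is the Claim_ definition above) =====
set_option maxHeartbeats 4000000 in
theorem count_no_case_sensitive_spec : Claim_equal_count_no_case_sensitive := by
  intro sentence _
  unfold Spec_count_no_case_sensitive
  unfold count_no_case_sensitive
  rw [← PySem.List.dedup_eq_ofList]
  have hwords : ∀ w ∈ PySem.List.dedup (PySem.Str.split₀ (PySem.Str.lower sentence)),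
      w.toList ≠ [] ∧ PySem.Str.lower w = w := by
    intro w hw
    have hw' : w ∈ PySem.Str.split₀ (PySem.Str.lower sentence) :=
      (PySem.List.mem_dedup _ _).mp hw
    unfold PySem.Str.split₀ at hw'
    obtain ⟨cs, hcs, rfl⟩ := List.mem_map.mp hw'
    rw [PySem.Str.toList_lower] at hcs
    obtain ⟨hne, hlo⟩ := pv_word_facts sentence.toList cs hcs
    constructor
    · rw [String.toList_ofList]; exact hne
    · unfold PySem.Str.lower
      rw [String.toList_ofList, hlo]
  have hndws : (PySem.List.dedup (PySem.Str.split₀ (PySem.Str.lower sentence))).Nodup :=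
    PySem.List.nodup_dedup _
  rw [pv_outerA sentence _ PySem.Dict.empty (fun w h => (hwords w h).2) hndws
    (fun w _ => PySem.Dict.contains_empty w)]
  have hempty : (PySem.Dict.empty : PySem.Dict String Int).items = [] := rfl
  rw [hempty, List.nil_append]
  rw [pv_alt_unfold, pv_B_eval _ _ _ _ hndws]
  apply List.map_congr_left
  intro w hw
  obtain ⟨hne, hl⟩ := hwords w hw
  congr 1
  rw [zero_add]
  congr 1
  refine (pv_word_count sentence _ w hne hl ?_ (PySem.List.nodup_dedup _) ?_).symm
  · intro L hL
    have := (PySem.List.mem_dedup _ _).mp hL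
    obtain ⟨w', _, rfl⟩ := List.mem_map.mp this
    exact ⟨w'.toList.length, rfl⟩
  · rw [PySem.List.mem_dedup]
    exact List.mem_map.mpr ⟨w, hw, rfl⟩
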